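-- pv_equiv track=rewrite | github.com/zhoujy22/DeepSeq3 | src/utils/circuit_utils.py | simulator_truth_table
-- ===== SOURCE A (Python) =====
-- def dec2list(num, no_PIs):
--     res = []
--     bin_num = bin(num)[2:].zfill(no_PIs)
--     for ele in bin_num:
--         res.append(int(ele))
--     return res
--
-- def logic(gate_type, signals, gate_to_index):
--     if 'AND' in gate_to_index.keys() and gate_type == gate_to_index['AND']:  # AND
--         for s in signals:
--             if s == 0:
--                 return 0
--         return 1
--
--     elif 'NAND' in gate_to_index.keys() and gate_type == gate_to_index['NAND']:  # NAND
--         for s in signals: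
--             if s == 0:
--                 return 1
--         return 0
--
--     elif 'OR' in gate_to_index.keys() and gate_type == gate_to_index['OR']:  # OR
--         for s in signals:
--             if s == 1:
--                 return 1
--         return 0
--
--     elif 'NOR' in gate_to_index.keys() and gate_type == gate_to_index['NOR']:  # NOR
--         for s in signals:
--             if s == 1:
--                 return 0
--         return 1
--
--     elif 'NOT' in gate_to_index.keys() and gate_type == gate_to_index['NOT']:  # NOT
--         for s in signals:
--             if s == 1:
--                 return 0
--             else:
--                 return 1
--
--     elif 'XOR' in gate_to_index.keys() and gate_type == gate_to_index['XOR']:  # XOR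
--         z_count = 0
--         o_count = 0
--         for s in signals:
--             if s == 0:
--                 z_count = z_count + 1
--             elif s == 1:
--                 o_count = o_count + 1
--         if z_count == len(signals) or o_count == len(signals):
--             return 0
--         return 1
--     else:
--         for s in signals:
--             return s
--
-- def simulator_truth_table(x_data, PI_indexes, level_list, fanin_list, gate_to_index):
--     no_of_patterns = int(pow(2, len(PI_indexes)))
--     truth_table = []
--     for idx in range(len(x_data)):
--         truth_table.append([])
--
--     for pattern_idx in range(no_of_patterns):
--         input_vector = dec2list(pattern_idx, len(PI_indexes))
--         state = [-1] * len(x_data)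
--
--         for k, pi_idx in enumerate(PI_indexes):
--             state[pi_idx] = input_vector[k]
--
--         for level in range(1, len(level_list), 1):
--             for node_idx in level_list[level]:
--                 source_signals = []
--                 for pre_idx in fanin_list[node_idx]:
--                     source_signals.append(state[pre_idx])
--                 if len(source_signals) > 0:
--                     gate_type = x_data[node_idx][1]
--                     res = logic(gate_type, source_signals, gate_to_index)
--                     state[node_idx] = res
--
--         for idx in range(len(x_data)):
--             truth_table[idx].append(state[idx])
--
--     return truth_table
-- ===== SOURCE B (Python) =====
-- def _gate_vec(gt, sigs, gate_to_index, P):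
--     # evaluate one gate over all 2^n patterns at once, on pattern-vectors
--     if 'AND' in gate_to_index and gt == gate_to_index['AND']:
--         out = [1] * P
--         for s in sigs:
--             out = [0 if sp == 0 else o for o, sp in zip(out, s)]
--         return out
--     if 'NAND' in gate_to_index and gt == gate_to_index['NAND']:
--         out = [0] * P
--         for s in sigs:
--             out = [1 if sp == 0 else o for o, sp in zip(out, s)]
--         return out
--     if 'OR' in gate_to_index and gt == gate_to_index['OR']:
--         out = [0] * P
--         for s in sigs:
--             out = [1 if sp == 1 else o for o, sp in zip(out, s)]
--         return out
--     if 'NOR' in gate_to_index and gt == gate_to_index['NOR']: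
--         out = [1] * P
--         for s in sigs:
--             out = [0 if sp == 1 else o for o, sp in zip(out, s)]
--         return out
--     if 'NOT' in gate_to_index and gt == gate_to_index['NOT']:
--         return [0 if sp == 1 else 1 for sp in sigs[0]]
--     if 'XOR' in gate_to_index and gt == gate_to_index['XOR']:
--         allz = [1] * P
--         allo = [1] * P
--         for s in sigs:
--             allz = [a if sp == 0 else 0 for a, sp in zip(allz, s)]
--             allo = [a if sp == 1 else 0 for a, sp in zip(allo, s)]
--         return [0 if z or o else 1 for z, o in zip(allz, allo)]
--     return list(sigs[0])
--
-- def simulator_truth_table(x_data, PI_indexes, level_list, fanin_list, gate_to_index):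
--     # one pass over the circuit: each node carries its whole pattern-vector
--     n = len(PI_indexes)
--     P = 2 ** n
--     vec = [[-1] * P for _ in x_data]
--     for k, pi in enumerate(PI_indexes):
--         b = n - 1 - k
--         vec[pi] = [(p >> b) & 1 for p in range(P)]
--     for level in level_list[1:]:
--         for node in level:
--             fis = fanin_list[node]
--             sigs = [vec[pre] for pre in fis]
--             if sigs:
--                 vec[node] = _gate_vec(x_data[node][1], sigs, gate_to_index, P)
--     return vec
-- ===== Notes on version B (the rewrite author's own statement) =====
-- stated objective: alternative
-- what changed: Instead of re-simulating the whole circuit once per input pattern (2^n passes over the levels), B makes a single pass over the levels with each node carrying its entire vector of values over all 2^n patterns, evaluating every gate once with vectorized all-pattern operations.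
import Mathlib
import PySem

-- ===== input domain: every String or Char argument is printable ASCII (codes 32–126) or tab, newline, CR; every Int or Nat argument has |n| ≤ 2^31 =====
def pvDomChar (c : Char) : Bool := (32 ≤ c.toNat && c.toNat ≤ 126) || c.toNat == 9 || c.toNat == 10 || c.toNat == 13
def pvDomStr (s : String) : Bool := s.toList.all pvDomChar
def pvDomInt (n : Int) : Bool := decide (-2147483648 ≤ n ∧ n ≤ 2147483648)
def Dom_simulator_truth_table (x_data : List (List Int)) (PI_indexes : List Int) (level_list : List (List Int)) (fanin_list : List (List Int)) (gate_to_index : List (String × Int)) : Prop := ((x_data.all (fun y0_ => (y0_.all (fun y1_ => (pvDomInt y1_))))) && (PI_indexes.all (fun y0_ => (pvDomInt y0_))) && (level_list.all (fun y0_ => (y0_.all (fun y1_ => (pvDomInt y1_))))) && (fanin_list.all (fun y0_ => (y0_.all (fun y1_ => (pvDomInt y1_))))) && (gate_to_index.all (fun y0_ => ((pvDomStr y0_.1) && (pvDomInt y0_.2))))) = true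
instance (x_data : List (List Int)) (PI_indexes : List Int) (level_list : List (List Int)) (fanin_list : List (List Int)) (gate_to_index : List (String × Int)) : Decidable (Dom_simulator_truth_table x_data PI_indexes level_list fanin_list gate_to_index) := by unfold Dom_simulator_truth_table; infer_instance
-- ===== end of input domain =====

-- B replaces A's pattern-by-pattern re-simulation (2^n passes over the circuit) by ONE pass over the
-- levels in which every node carries its whole vector of values over all 2^n patterns (alternative
-- decomposition, same exact results).

-- ===== PORT A =====
-- the early-return scans inside logic()
def pvScanAnd : List Int → Int
  | [] => 1
  | s :: t => if s == 0 then 0 else pvScanAnd t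
def pvScanNand : List Int → Int
  | [] => 0
  | s :: t => if s == 0 then 1 else pvScanNand t
def pvScanOr : List Int → Int
  | [] => 0
  | s :: t => if s == 1 then 1 else pvScanOr t
def pvScanNor : List Int → Int
  | [] => 1
  | s :: t => if s == 1 then 0 else pvScanNor t

-- "'K' in gate_to_index.keys() and gate_type == gate_to_index['K']" (identical test in both programs)
def pvKeyIs (g2i : PySem.Dict String Int) (key : String) (gt : Int) : Bool :=
  g2i.contains key && (gt == g2i.getD key 0)

-- logic(); `none` exactly where the Python returns None (empty signals in the NOT/default branch —
-- unreachable from the call site, which guards len(source_signals) > 0)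
def pvLogic (gt : Int) (signals : List Int) (g2i : PySem.Dict String Int) : Option Int :=
  if pvKeyIs g2i "AND" gt then some (pvScanAnd signals)
  else if pvKeyIs g2i "NAND" gt then some (pvScanNand signals)
  else if pvKeyIs g2i "OR" gt then some (pvScanOr signals)
  else if pvKeyIs g2i "NOR" gt then some (pvScanNor signals)
  else if pvKeyIs g2i "NOT" gt then
    match signals with
    | s :: _ => some (if s == 1 then (0 : Int) else 1)
    | [] => none
  else if pvKeyIs g2i "XOR" gt then
    let zo := signals.foldl (fun (zo : Int × Int) s =>
      if s == 0 then (zo.1 + 1, zo.2) else if s == 1 then (zo.1, zo.2 + 1) else zo) (0, 0)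
    some (if zo.1 == (signals.length : Int) || zo.2 == (signals.length : Int) then 0 else 1)
  else signals.head?

-- dec2list: bin(num)[2:].zfill(no_PIs), each char through int(ele)
-- (num = pattern_idx ≥ 0 here, so every char is '0'/'1' and int(ele) never raises; getD 0 unreachable)
def pvDec2list (num : Int) (no_PIs : Int) : List Int :=
  let bin_num := PySem.Chars.zfill (PySem.List.slice (PySem.Int.toBinChars0b num) (some 2) none) no_PIs
  bin_num.foldl (fun res ele => res ++ [(PySem.Int.ofChars? [ele]).getD 0]) []

def simulator_truth_table (x_data : List (List Int)) (PI_indexes : List Int) (level_list : List (List Int)) (fanin_list : List (List Int)) (gate_to_index : List (String × Int)) : List (List Int) :=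
  let g2i := PySem.Dict.ofList gate_to_index
  let no_of_patterns := 2 ^ PI_indexes.length
  let truth_table := (List.range x_data.length).foldl (fun tt _ => tt ++ [([] : List Int)]) []
  (List.range no_of_patterns).foldl (fun tt (pattern_idx : Nat) =>
    let input_vector := pvDec2list (pattern_idx : Int) (PI_indexes.length : Int)
    let state0 := List.replicate x_data.length (-1 : Int)
    let state1 := (PySem.List.enumerate PI_indexes 0).foldl
        (fun st kp => PySem.List.pySetD st kp.2 (PySem.List.pyGetD input_vector kp.1 0)) state0
    let state2 := (PySem.List.pyRange 1 (PySem.List.len level_list) 1).foldl (fun st level =>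
        (PySem.List.pyGetD level_list level []).foldl (fun st node_idx =>
          let source_signals := (PySem.List.pyGetD fanin_list node_idx []).foldl
              (fun acc pre_idx => acc ++ [PySem.List.pyGetD st pre_idx (-1)]) []
          if source_signals.length > 0 then
            let gate_type := PySem.List.pyGetD (PySem.List.pyGetD x_data node_idx []) 1 (-1)
            let res := pvLogic gate_type source_signals g2i
            PySem.List.pySetD st node_idx (res.getD (-1))
          else st) st) state1
    (List.range x_data.length).foldl (fun tt (idx : Nat) =>
        PySem.List.pySetD tt (idx : Int)
          (PySem.List.pyGetD tt (idx : Int) [] ++ [PySem.List.pyGetD state2 (idx : Int) (-1)])) tt)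
    truth_table

-- ===== PORT B =====
-- _gate_vec: one gate evaluated over all 2^n patterns at once, on pattern-vectors
def pvGateVec (gt : Int) (sigs : List (List Int)) (g2i : PySem.Dict String Int) (P : Nat) : List Int :=
  if pvKeyIs g2i "AND" gt then
    sigs.foldl (fun out s => (out.zip s).map (fun os => if os.2 == 0 then 0 else os.1)) (List.replicate P 1)
  else if pvKeyIs g2i "NAND" gt then
    sigs.foldl (fun out s => (out.zip s).map (fun os => if os.2 == 0 then 1 else os.1)) (List.replicate P 0)
  else if pvKeyIs g2i "OR" gt then
    sigs.foldl (fun out s => (out.zip s).map (fun os => if os.2 == 1 then 1 else os.1)) (List.replicate P 0)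
  else if pvKeyIs g2i "NOR" gt then
    sigs.foldl (fun out s => (out.zip s).map (fun os => if os.2 == 1 then 0 else os.1)) (List.replicate P 1)
  else if pvKeyIs g2i "NOT" gt then
    (sigs.headD []).map (fun sp => if sp == 1 then (0 : Int) else 1)  -- sigs[0]; nonempty at call site
  else if pvKeyIs g2i "XOR" gt then
    let zo := sigs.foldl (fun (zo : List Int × List Int) s =>
      ((zo.1.zip s).map (fun az => if az.2 == 0 then az.1 else 0),
       (zo.2.zip s).map (fun ao => if ao.2 == 1 then ao.1 else 0)))
      (List.replicate P 1, List.replicate P 1)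
    (zo.1.zip zo.2).map (fun z => if z.1 != 0 || z.2 != 0 then 0 else 1)
  else sigs.headD []  -- list(sigs[0]); nonempty at call site

def simulator_truth_table_alt (x_data : List (List Int)) (PI_indexes : List Int) (level_list : List (List Int)) (fanin_list : List (List Int)) (gate_to_index : List (String × Int)) : List (List Int) :=
  let g2i := PySem.Dict.ofList gate_to_index
  let n := PI_indexes.length
  let P := 2 ^ n
  let vec0 := x_data.map (fun _ => List.replicate P (-1 : Int))
  -- b = n - 1 - k ≥ 0 (k < n), so Nat subtraction below agrees with Python's int arithmetic
  let vec1 := (PySem.List.enumerate PI_indexes 0).foldl (fun v kp =>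
      PySem.List.pySetD v kp.2
        ((List.range P).map (fun p => (((p >>> (n - 1 - kp.1.toNat)) &&& 1 : Nat) : Int)))) vec0
  (PySem.List.slice level_list (some 1) none).foldl (fun v level =>
      level.foldl (fun v node =>
        let fis := PySem.List.pyGetD fanin_list node []
        let sigs := fis.map (fun pre => PySem.List.pyGetD v pre [])
        if sigs ≠ [] then
          PySem.List.pySetD v node
            (pvGateVec (PySem.List.pyGetD (PySem.List.pyGetD x_data node []) 1 (-1)) sigs g2i P)
        else v) v) vec1

-- ===== PRECONDITION & SPEC =====
-- Pre_ = exactly the inputs where A raises no IndexError: every PI index a valid (possibly negative)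
-- index into x_data, every processed node a valid index into fanin_list, its fanins valid indices into
-- the state, and — when it has fanins — the node a valid index into x_data with a row of length ≥ 2.
def Pre_simulator_truth_table (x_data : List (List Int)) (PI_indexes : List Int) (level_list : List (List Int)) (fanin_list : List (List Int)) (gate_to_index : List (String × Int)) : Prop :=
  (∀ pi ∈ PI_indexes, PySem.Raise.InRange x_data.length pi) ∧
  (∀ lvl ∈ level_list.drop 1, ∀ node ∈ lvl,
    PySem.Raise.InRange fanin_list.length node ∧
    (∀ pre ∈ PySem.List.pyGetD fanin_list node [], PySem.Raise.InRange x_data.length pre) ∧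
    (PySem.List.pyGetD fanin_list node [] ≠ [] →
      PySem.Raise.InRange x_data.length node ∧ 2 ≤ (PySem.List.pyGetD x_data node []).length))
instance (x_data : List (List Int)) (PI_indexes : List Int) (level_list : List (List Int)) (fanin_list : List (List Int)) (gate_to_index : List (String × Int)) : Decidable (Pre_simulator_truth_table x_data PI_indexes level_list fanin_list gate_to_index) := by unfold Pre_simulator_truth_table; infer_instance

def pvWitness_simulator_truth_table : List (List Int) × List Int × List (List Int) × List (List Int) × (List (String × Int)) :=
  ([[0, 0], [0, 0], [0, 1]], [0, 1], [[0, 1], [2]], [[], [], [0, 1]], [("AND", 1)])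

def Spec_simulator_truth_table (x_data : List (List Int)) (PI_indexes : List Int) (level_list : List (List Int)) (fanin_list : List (List Int)) (gate_to_index : List (String × Int)) (out : List (List Int)) : Prop := out = simulator_truth_table_alt x_data PI_indexes level_list fanin_list gate_to_index
instance (x_data : List (List Int)) (PI_indexes : List Int) (level_list : List (List Int)) (fanin_list : List (List Int)) (gate_to_index : List (String × Int)) (out : List (List Int)) : Decidable (Spec_simulator_truth_table x_data PI_indexes level_list fanin_list gate_to_index out) := by unfold Spec_simulator_truth_table; infer_instance

-- ===== CLAIM (what is proved, stated in full; the proofs are below) =====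
def Claim_equal_simulator_truth_table : Prop := ∀ (x_data : List (List Int)) (PI_indexes : List Int) (level_list : List (List Int)) (fanin_list : List (List Int)) (gate_to_index : List (String × Int)), Dom_simulator_truth_table x_data PI_indexes level_list fanin_list gate_to_index → Pre_simulator_truth_table x_data PI_indexes level_list fanin_list gate_to_index → Spec_simulator_truth_table x_data PI_indexes level_list fanin_list gate_to_index (simulator_truth_table x_data PI_indexes level_list fanin_list gate_to_index)

-- ===== LEMMAS AND PROOFS =====

-- ## proof-side index-wrapping helpers
def pvWrap (len : Nat) (i : Int) : Nat := (PySem.List.pyIdx? len i).getD 0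

lemma pyIdx?_eq_wrap {len : Nat} {i : Int} (h : PySem.Raise.InRange len i) :
    PySem.List.pyIdx? len i = some (pvWrap len i) := by
  obtain ⟨h1, h2⟩ := h
  simp only [PySem.List.pyIdx?, pvWrap]
  split_ifs with h3 h4 h5 <;> simp_all <;> omega

lemma pvWrap_lt {len : Nat} {i : Int} (h : PySem.Raise.InRange len i) : pvWrap len i < len := by
  obtain ⟨h1, h2⟩ := h
  simp only [pvWrap, PySem.List.pyIdx?]
  split_ifs with h3 h4 h5 <;> simp_all <;> omega

lemma pyGetD_wrap {α : Type} (xs : List α) {i : Int} (d : α) (h : PySem.Raise.InRange xs.length i) :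
    PySem.List.pyGetD xs i d = xs.getD (pvWrap xs.length i) d := by
  simp [PySem.List.pyGetD, PySem.List.pyGet?, pyIdx?_eq_wrap h, List.getD_eq_getElem?_getD]

lemma pySetD_wrap {α : Type} (xs : List α) {i : Int} (v : α) (h : PySem.Raise.InRange xs.length i) :
    PySem.List.pySetD xs i v = xs.set (pvWrap xs.length i) v := by
  simp [PySem.List.pySetD, PySem.List.pySet?, pyIdx?_eq_wrap h]

-- ## the scalar scans of logic(), characterized
lemma scanAnd_eq (l : List Int) : pvScanAnd l = if l.any (· == 0) then 0 else 1 := by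
  induction l with
  | nil => rfl
  | cons s t ih => by_cases h : s = 0 <;> simp [pvScanAnd, h, ih]

lemma scanNand_eq (l : List Int) : pvScanNand l = if l.any (· == 0) then 1 else 0 := by
  induction l with
  | nil => rfl
  | cons s t ih => by_cases h : s = 0 <;> simp [pvScanNand, h, ih]

lemma scanOr_eq (l : List Int) : pvScanOr l = if l.any (· == 1) then 1 else 0 := by
  induction l with
  | nil => rfl
  | cons s t ih => by_cases h : s = 1 <;> simp [pvScanOr, h, ih]

lemma scanNor_eq (l : List Int) : pvScanNor l = if l.any (· == 1) then 0 else 1 := by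
  induction l with
  | nil => rfl
  | cons s t ih => by_cases h : s = 1 <;> simp [pvScanNor, h, ih]

lemma xorCount_eq (l : List Int) : ∀ a b : Int,
    l.foldl (fun (zo : Int × Int) s =>
      if s == 0 then (zo.1 + 1, zo.2) else if s == 1 then (zo.1, zo.2 + 1) else zo) (a, b)
    = (a + l.countP (· == 0), b + l.countP (· == 1)) := by
  induction l with
  | nil => simp
  | cons s t ih =>
    intro a b
    simp only [List.foldl_cons, List.countP_cons]
    by_cases h0 : s = 0
    · subst h0
      simp only [show ((0:Int) == 0) = true from rfl, if_true, ih, Prod.mk.injEq]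
      norm_num
      omega
    · by_cases h1 : s = 1
      · subst h1
        simp only [show ((1:Int) == 0) = false from rfl, show ((1:Int) == 1) = true from rfl,
          if_true, if_false, ih, Prod.mk.injEq]
        norm_num
        omega
      · rw [if_neg (by simpa using h0), if_neg (by simpa using h1), ih]
        simp [h0, h1]

-- ## generic all-pattern vector folds, characterized pointwise
lemma foldZipCv (pred : Int → Bool) (cv : Int) :
    ∀ (ss : List (List Int)) (out : List Int), (∀ s ∈ ss, out.length ≤ s.length) →
    ss.foldl (fun o s => (o.zip s).map (fun os => if pred os.2 then cv else os.1)) out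
    = (List.range out.length).map
        (fun p => if ss.any (fun s => pred (s.getD p (-1))) then cv else out.getD p (-1)) := by
  intro ss
  induction ss with
  | nil =>
    intro out _
    apply List.ext_getElem (by simp)
    intro p h1 h2
    rw [List.getElem_map, List.getElem_range]
    exact (List.getD_eq_getElem out (-1) (by simpa using h1)).symm
  | cons s t ih =>
    intro out hl
    have hs : out.length ≤ s.length := hl s (by simp)
    have hlen : ((out.zip s).map (fun os => if pred os.2 then cv else os.1)).length = out.length := by
      simp; omega
    simp only [List.foldl_cons]
    rw [ih _ (by intro u hu; rw [hlen]; exact hl u (by simp [hu]))]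
    rw [hlen]
    apply List.map_congr_left
    intro p hp
    rw [List.mem_range] at hp
    have h1 : (((out.zip s).map (fun os => if pred os.2 then cv else os.1)).getD p (-1))
        = if pred (s.getD p (-1)) then cv else out.getD p (-1) := by
      rw [List.getD_eq_getElem _ _ (by omega), List.getElem_map, List.getElem_zip,
        List.getD_eq_getElem _ _ (by omega), List.getD_eq_getElem _ _ (by omega)]
    rw [h1, List.any_cons]
    rcases Bool.eq_false_or_eq_true (pred (s.getD p (-1))) with hps | hps <;> rw [hps] <;> simp

lemma foldZipKeep (pred : Int → Bool) :
    ∀ (ss : List (List Int)) (out : List Int), (∀ s ∈ ss, out.length ≤ s.length) →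
    ss.foldl (fun o s => (o.zip s).map (fun os => if pred os.2 then os.1 else 0)) out
    = (List.range out.length).map
        (fun p => if ss.all (fun s => pred (s.getD p (-1))) then out.getD p (-1) else 0) := by
  intro ss
  induction ss with
  | nil =>
    intro out _
    apply List.ext_getElem (by simp)
    intro p h1 h2
    rw [List.getElem_map, List.getElem_range]
    exact (List.getD_eq_getElem out (-1) (by simpa using h1)).symm
  | cons s t ih =>
    intro out hl
    have hs : out.length ≤ s.length := hl s (by simp)
    have hlen : ((out.zip s).map (fun os => if pred os.2 then os.1 else 0)).length = out.length := by
      simp; omega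
    simp only [List.foldl_cons]
    rw [ih _ (by intro u hu; rw [hlen]; exact hl u (by simp [hu]))]
    rw [hlen]
    apply List.map_congr_left
    intro p hp
    rw [List.mem_range] at hp
    have h1 : (((out.zip s).map (fun os => if pred os.2 then os.1 else 0)).getD p (-1))
        = if pred (s.getD p (-1)) then out.getD p (-1) else 0 := by
      rw [List.getD_eq_getElem _ _ (by omega), List.getElem_map, List.getElem_zip,
        List.getD_eq_getElem _ _ (by omega), List.getD_eq_getElem _ _ (by omega)]
    rw [h1, List.all_cons]
    rcases Bool.eq_false_or_eq_true (pred (s.getD p (-1))) with hps | hps <;> rw [hps] <;> simp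

lemma getDRange_self (s : List Int) : (List.range s.length).map (fun p => s.getD p (-1)) = s := by
  apply List.ext_getElem (by simp)
  intro p h1 h2
  rw [List.getElem_map, List.getElem_range]
  exact List.getD_eq_getElem s (-1) (by simpa using h2)

lemma countP_eq_all (l : List Int) (v : Int) :
    ((l.countP (· == v) : Int) == (l.length : Int)) = l.all (· == v) := by
  rcases Bool.eq_false_or_eq_true (l.all (· == v)) with ha | ha <;> rw [ha]
  · rw [beq_iff_eq]
    exact_mod_cast List.countP_eq_length.mpr (List.all_eq_true.mp ha)
  · rw [beq_eq_false_iff_ne]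
    intro hc
    have hc' : l.countP (· == v) = l.length := by exact_mod_cast hc
    have hall := List.countP_eq_length.mp hc'
    have hna : ¬ ∀ x ∈ l, (x == v) = true := by
      rw [← List.all_eq_true, ha]; simp
    exact hna hall

lemma gateVec_eq (gt : Int) (g2i : PySem.Dict String Int) (P : Nat) (ss : List (List Int))
    (hlen : ∀ s ∈ ss, s.length = P) (hne : ss ≠ []) :
    pvGateVec gt ss g2i P
    = (List.range P).map (fun p => (pvLogic gt (ss.map (fun s => s.getD p (-1))) g2i).getD (-1)) := by
  have hle : ∀ c : Int, ∀ s ∈ ss, (List.replicate P c).length ≤ s.length := by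
    intro c s hs; simp [hlen s hs]
  by_cases hA : pvKeyIs g2i "AND" gt = true
  · simp only [pvGateVec, pvLogic, hA, if_true, Option.getD_some]
    refine (foldZipCv (fun x => x == 0) 0 ss (List.replicate P 1) (hle 1)).trans ?_
    simp only [List.length_replicate]
    apply List.map_congr_left
    intro p hp
    rw [List.mem_range] at hp
    rw [scanAnd_eq, List.any_map]
    simp only [Function.comp_def]
    split_ifs with h
    · rfl
    · rw [List.getD_replicate]
      exact hp
  · by_cases hB : pvKeyIs g2i "NAND" gt = true
    · simp only [pvGateVec, pvLogic, hA, hB, if_true, Bool.false_eq_true, if_false, Option.getD_some]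
      refine (foldZipCv (fun x => x == 0) 1 ss (List.replicate P 0) (hle 0)).trans ?_
      simp only [List.length_replicate]
      apply List.map_congr_left
      intro p hp
      rw [List.mem_range] at hp
      rw [scanNand_eq, List.any_map]
      simp only [Function.comp_def]
      split_ifs with h
      · rfl
      · rw [List.getD_replicate]
        exact hp
    · by_cases hC : pvKeyIs g2i "OR" gt = true
      · simp only [pvGateVec, pvLogic, hA, hB, hC, if_true, Bool.false_eq_true, if_false,
          Option.getD_some]
        refine (foldZipCv (fun x => x == 1) 1 ss (List.replicate P 0) (hle 0)).trans ?_
        simp only [List.length_replicate]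
        apply List.map_congr_left
        intro p hp
        rw [List.mem_range] at hp
        rw [scanOr_eq, List.any_map]
        simp only [Function.comp_def]
        split_ifs with h
        · rfl
        · rw [List.getD_replicate]
          exact hp
      · by_cases hD : pvKeyIs g2i "NOR" gt = true
        · simp only [pvGateVec, pvLogic, hA, hB, hC, hD, if_true, Bool.false_eq_true, if_false,
            Option.getD_some]
          refine (foldZipCv (fun x => x == 1) 0 ss (List.replicate P 1) (hle 1)).trans ?_
          simp only [List.length_replicate]
          apply List.map_congr_left
          intro p hp
          rw [List.mem_range] at hp
          rw [scanNor_eq, List.any_map]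
          simp only [Function.comp_def]
          split_ifs with h
          · rfl
          · rw [List.getD_replicate]
            exact hp
        · obtain ⟨s0, t0, rfl⟩ := List.exists_cons_of_ne_nil hne
          have hs0 : s0.length = P := hlen s0 (by simp)
          by_cases hE : pvKeyIs g2i "NOT" gt = true
          · simp only [pvGateVec, pvLogic, hA, hB, hC, hD, hE, if_true, Bool.false_eq_true,
              if_false, List.headD_cons, List.map_cons, Option.getD_some]
            conv_lhs => rw [← getDRange_self s0]
            rw [List.map_map, hs0]
            rfl
          · by_cases hF : pvKeyIs g2i "XOR" gt = true
            · simp only [pvGateVec, pvLogic, hA, hB, hC, hD, hE, hF, if_true, Bool.false_eq_true,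
                if_false, Option.getD_some]
              have hsplit :
                  (List.foldl (fun (zo : List Int × List Int) s =>
                      ((zo.1.zip s).map (fun az => if az.2 == 0 then az.1 else 0),
                       (zo.2.zip s).map (fun ao => if ao.2 == 1 then ao.1 else 0)))
                    (List.replicate P 1, List.replicate P 1) (s0 :: t0))
                  = ((s0 :: t0).foldl (fun o s => (o.zip s).map (fun az => if az.2 == 0 then az.1 else 0)) (List.replicate P 1),
                     (s0 :: t0).foldl (fun o s => (o.zip s).map (fun ao => if ao.2 == 1 then ao.1 else 0)) (List.replicate P 1)) :=
                PySem.List.foldl_prod_mk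
                  (fun (o s : List Int) => (o.zip s).map (fun az => if az.2 == 0 then az.1 else 0))
                  (fun (o s : List Int) => (o.zip s).map (fun ao => if ao.2 == 1 then ao.1 else 0))
                  (s0 :: t0) (List.replicate P 1) (List.replicate P 1)
              rw [hsplit]
              have hkz : (s0 :: t0).foldl (fun o s => (o.zip s).map (fun az => if az.2 == 0 then az.1 else 0)) (List.replicate P 1)
                  = (List.range (List.replicate P (1:Int)).length).map
                      (fun p => if (s0 :: t0).all (fun s => s.getD p (-1) == 0) then (List.replicate P (1:Int)).getD p (-1) else 0) :=
                foldZipKeep (fun x => x == 0) (s0 :: t0) (List.replicate P 1) (hle 1)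
              have hko : (s0 :: t0).foldl (fun o s => (o.zip s).map (fun ao => if ao.2 == 1 then ao.1 else 0)) (List.replicate P 1)
                  = (List.range (List.replicate P (1:Int)).length).map
                      (fun p => if (s0 :: t0).all (fun s => s.getD p (-1) == 1) then (List.replicate P (1:Int)).getD p (-1) else 0) :=
                foldZipKeep (fun x => x == 1) (s0 :: t0) (List.replicate P 1) (hle 1)
              rw [hkz, hko]
              simp only [List.length_replicate]
              rw [List.zip_map', List.map_map]
              apply List.map_congr_left
              intro p hp
              rw [List.mem_range] at hp
              simp only [Function.comp_def]
              rw [xorCount_eq]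
              simp only [Int.zero_add]
              rw [countP_eq_all, countP_eq_all, List.all_map, List.all_map]
              simp only [Function.comp_def]
              rcases Bool.eq_false_or_eq_true ((s0 :: t0).all fun s => s.getD p (-1) == 0)
                with ha0 | ha0 <;>
                rcases Bool.eq_false_or_eq_true ((s0 :: t0).all fun s => s.getD p (-1) == 1)
                  with ha1 | ha1 <;>
                simp [ha0, ha1, List.getD_replicate, hp]
            · simp only [pvGateVec, pvLogic, hA, hB, hC, hD, hE, hF, Bool.false_eq_true, if_false,
                List.headD_cons, List.map_cons, List.head?_cons, Option.getD_some]
              conv_lhs => rw [← getDRange_self s0]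
              rw [hs0]

-- ## bin()/zfill digits: dec2list p n is the MSB-first bit list of p
lemma toDigitsCore_acc (b : Nat) : ∀ (f n : Nat) (l : List Char),
    Nat.toDigitsCore b f n l = Nat.toDigitsCore b f n [] ++ l := by
  intro f
  induction f with
  | zero => intro n l; simp [Nat.toDigitsCore]
  | succ f ih =>
    intro n l
    simp only [Nat.toDigitsCore]
    split_ifs with h
    · rfl
    · rw [ih (n / b) (Nat.digitChar (n % b) :: l), ih (n / b) [Nat.digitChar (n % b)]]
      simp

lemma toDigitsCore_fuel : ∀ (n f f' : Nat), n < f → n < f' →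
    Nat.toDigitsCore 2 f n [] = Nat.toDigitsCore 2 f' n [] := by
  intro n
  induction n using Nat.strong_induction_on with
  | _ n ih =>
    intro f f' hf hf'
    match f, f' with
    | f + 1, f' + 1 =>
      simp only [Nat.toDigitsCore]
      split_ifs with h
      · rfl
      · rw [toDigitsCore_acc 2 f, toDigitsCore_acc 2 f']
        have hlt : n / 2 < n := Nat.div_lt_self (by omega) (by omega)
        rw [ih (n / 2) hlt f f' (by omega) (by omega)]

lemma toDigits_two_step (p : Nat) (h : 2 ≤ p) :
    Nat.toDigits 2 p = Nat.toDigits 2 (p / 2) ++ [Nat.digitChar (p % 2)] := by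
  show Nat.toDigitsCore 2 (p + 1) p [] = Nat.toDigitsCore 2 (p / 2 + 1) (p / 2) [] ++ _
  have h2 : p / 2 ≠ 0 := by omega
  conv_lhs => rw [show p + 1 = p + 1 from rfl]
  simp only [Nat.toDigitsCore]
  rw [if_neg h2]
  rw [toDigitsCore_acc 2 p (p / 2)]
  congr 1
  exact toDigitsCore_fuel (p / 2) p (p / 2 + 1) (by omega) (by omega)

lemma toDigits_two_mem (p : Nat) : ∀ c ∈ Nat.toDigits 2 p, c = '0' ∨ c = '1' := by
  induction p using Nat.strong_induction_on with
  | _ p ih =>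
    by_cases h : 2 ≤ p
    · rw [toDigits_two_step p h]
      intro c hc
      rcases List.mem_append.mp hc with hc | hc
      · exact ih (p / 2) (by omega) c hc
      · have : p % 2 = 0 ∨ p % 2 = 1 := by omega
        rcases List.mem_singleton.mp hc with rfl
        rcases this with h0 | h0 <;> rw [h0] <;> simp [Nat.digitChar]
    · have h01 : Nat.toDigits 2 p = [Nat.digitChar p] := by
        interval_cases p <;> rfl
      intro c hc
      rw [h01, List.mem_singleton] at hc
      subst hc
      have hp : p = 0 ∨ p = 1 := by omega
      rcases hp with rfl | rfl
      · left; rfl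
      · right; rfl

lemma toDigits_two_ne_nil (p : Nat) : Nat.toDigits 2 p ≠ [] := by
  by_cases h : 2 ≤ p
  · rw [toDigits_two_step p h]; simp
  · have h01 : Nat.toDigits 2 p = [Nat.digitChar p] := by
      interval_cases p <;> rfl
    rw [h01]; simp

def pvChInt (c : Char) : Int := (PySem.Int.ofChars? [c]).getD 0

def pvMBits (p : Nat) : List Int := (Nat.toDigits 2 p).map pvChInt

lemma chInt_digit (d : Nat) (hd : d < 2) : pvChInt (Nat.digitChar d) = (d : Int) := by
  interval_cases d <;> decide

lemma mbits_step (p : Nat) (h : 2 ≤ p) : pvMBits p = pvMBits (p / 2) ++ [((p % 2 : Nat) : Int)] := by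
  unfold pvMBits
  rw [toDigits_two_step p h, List.map_append, List.map_singleton, chInt_digit _ (by omega)]

lemma mbits_small (p : Nat) (h : p < 2) : pvMBits p = [(p : Int)] := by
  have h01 : Nat.toDigits 2 p = [Nat.digitChar p] := by interval_cases p <;> rfl
  unfold pvMBits
  rw [h01, List.map_singleton, chInt_digit _ h]

lemma bits_eq : ∀ n : Nat, 1 ≤ n → ∀ p : Nat, p < 2 ^ n →
    List.replicate (n - (Nat.toDigits 2 p).length) (0 : Int) ++ pvMBits p
    = (List.range n).map (fun k => (((p >>> (n - 1 - k)) &&& 1 : Nat) : Int)) := by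
  intro n
  induction n with
  | zero => omega
  | succ n ih =>
    intro _ p hp
    by_cases hn : 1 ≤ n
    case neg =>
      -- n = 0 : base case n+1 = 1, p < 2
      have hn0 : n = 0 := by omega
      subst hn0
      interval_cases p <;> decide
    -- RHS decomposition
    have hrhs : (List.range (n + 1)).map (fun k => (((p >>> (n + 1 - 1 - k)) &&& 1 : Nat) : Int))
        = (List.range n).map (fun k => ((((p / 2) >>> (n - 1 - k)) &&& 1 : Nat) : Int))
          ++ [((p % 2 : Nat) : Int)] := by
      rw [List.range_succ, List.map_append, List.map_singleton]
      congr 1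
      · apply List.map_congr_left
        intro k hk
        rw [List.mem_range] at hk
        have harith : n + 1 - 1 - k = 1 + (n - 1 - k) := by omega
        rw [harith, Nat.shiftRight_add, Nat.shiftRight_one]
      · simp [Nat.and_one_is_mod]
    rw [hrhs]
    by_cases h2 : 2 ≤ p
    · have hdiv : p / 2 < 2 ^ n := by
        have : 2 ^ (n + 1) = 2 ^ n * 2 := pow_succ 2 n
        omega
      rw [toDigits_two_step p h2, mbits_step p h2, List.length_append, List.length_singleton]
      have hL : (Nat.toDigits 2 (p / 2)).length ≤ n :=
        Nat.toDigits_length 2 (p / 2) n (by omega) hdiv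
      have hcount : n + 1 - ((Nat.toDigits 2 (p / 2)).length + 1)
          = n - (Nat.toDigits 2 (p / 2)).length := by omega
      rw [hcount, ← List.append_assoc, ih hn (p / 2) hdiv]
    · have hsmall : p < 2 := by omega
      have h01 : Nat.toDigits 2 p = [Nat.digitChar p] := by interval_cases p <;> rfl
      rw [mbits_small p hsmall, h01, List.length_singleton]
      have hrepl : (List.range n).map (fun k => ((((p / 2) >>> (n - 1 - k)) &&& 1 : Nat) : Int))
          = List.replicate n (0 : Int) := by
        have hz : p / 2 = 0 := by omega
        rw [hz]
        apply List.eq_replicate_iff.mpr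
        constructor
        · simp
        · intro b hb
          obtain ⟨k, hk, rfl⟩ := List.mem_map.mp hb
          simp
      rw [hrepl]
      have hmod : p % 2 = p := by omega
      rw [hmod]
      have hsub : n + 1 - 1 = n := by omega
      rw [hsub]

lemma dec2list_eq (p n : Nat) (hn : 1 ≤ n) (hp : p < 2 ^ n) :
    pvDec2list (p : Int) (n : Int)
    = (List.range n).map (fun k => (((p >>> (n - 1 - k)) &&& 1 : Nat) : Int)) := by
  have hdigits : PySem.List.slice (PySem.Int.toBinChars0b (p : Int)) (some 2) none
      = Nat.toDigits 2 p := by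
    rw [PySem.List.slice_from _ (by norm_num)]
    simp [PySem.Int.toBinChars0b, show ¬((p : Int) < 0) by omega]
  have hL : (Nat.toDigits 2 p).length ≤ n := Nat.toDigits_length 2 p n hn hp
  have hzf : PySem.Chars.zfill (Nat.toDigits 2 p) (n : Int)
      = List.replicate (n - (Nat.toDigits 2 p).length) '0' ++ Nat.toDigits 2 p := by
    simp only [PySem.Chars.zfill]
    split_ifs with hle
    · have : (Nat.toDigits 2 p).length = n := by
        have : n ≤ (Nat.toDigits 2 p).length := by exact_mod_cast hle
        omega
      rw [this]
      simp
    · rcases hd : Nat.toDigits 2 p with _ | ⟨c, rest⟩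
      · exact absurd hd (toDigits_two_ne_nil p)
      · have hc : c = '0' ∨ c = '1' := toDigits_two_mem p c (by rw [hd]; simp)
        have hnotpm : ¬(c = '+' ∨ c = '-') := by rcases hc with rfl | rfl <;> decide
        simp only [hnotpm, if_false]
        have hnn : ((n : Int)).toNat = n := by omega
        rw [hnn]
  have hfold : pvDec2list (p : Int) (n : Int)
      = (PySem.Chars.zfill (PySem.List.slice (PySem.Int.toBinChars0b (p : Int)) (some 2) none) (n : Int)).map pvChInt := by
    show (PySem.Chars.zfill _ _).foldl (fun res ele => res ++ [pvChInt ele]) [] = _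
    rw [PySem.List.foldl_append_singleton_eq_map pvChInt _ []]
    rfl
  rw [hfold, hdigits, hzf, List.map_append, List.map_replicate]
  have hch0 : pvChInt '0' = 0 := by decide
  rw [hch0]
  exact bits_eq n hn p hp

-- ## the per-node updates of A (one pattern) and B (all patterns), and the transfer invariant
def pvAstep (x_data fanin_list : List (List Int)) (g2i : PySem.Dict String Int)
    (st : List Int) (node_idx : Int) : List Int :=
  let source_signals := (PySem.List.pyGetD fanin_list node_idx []).foldl
      (fun acc pre_idx => acc ++ [PySem.List.pyGetD st pre_idx (-1)]) []
  if source_signals.length > 0 then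
    let gate_type := PySem.List.pyGetD (PySem.List.pyGetD x_data node_idx []) 1 (-1)
    let res := pvLogic gate_type source_signals g2i
    PySem.List.pySetD st node_idx (res.getD (-1))
  else st

def pvBstep (x_data fanin_list : List (List Int)) (g2i : PySem.Dict String Int) (P : Nat)
    (v : List (List Int)) (node : Int) : List (List Int) :=
  let fis := PySem.List.pyGetD fanin_list node []
  let sigs := fis.map (fun pre => PySem.List.pyGetD v pre [])
  if sigs ≠ [] then
    PySem.List.pySetD v node
      (pvGateVec (PySem.List.pyGetD (PySem.List.pyGetD x_data node []) 1 (-1)) sigs g2i P)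
  else v

lemma set_inv (N P : Nat) (j : Int) (hj : PySem.Raise.InRange N j)
    (v : List (List Int)) (sts : Nat → List Int) (val : Nat → Int)
    (hv : v.length = N) (hsts : ∀ p, (sts p).length = N)
    (hagree : ∀ i, i < N → v.getD i [] = (List.range P).map (fun p => (sts p).getD i (-1))) :
    (PySem.List.pySetD v j ((List.range P).map val)).length = N ∧
    (∀ p, (PySem.List.pySetD (sts p) j (val p)).length = N) ∧
    (∀ i, i < N → (PySem.List.pySetD v j ((List.range P).map val)).getD i []
       = (List.range P).map (fun p => (PySem.List.pySetD (sts p) j (val p)).getD i (-1))) := by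
  have hjv : PySem.Raise.InRange v.length j := by rw [hv]; exact hj
  have hwv : pvWrap v.length j = pvWrap N j := by rw [hv]
  rw [pySetD_wrap v _ hjv, hwv]
  have hsetp : ∀ p, PySem.List.pySetD (sts p) j (val p) = (sts p).set (pvWrap N j) (val p) := by
    intro p
    have hjs : PySem.Raise.InRange (sts p).length j := by rw [hsts p]; exact hj
    rw [pySetD_wrap _ _ hjs, hsts p]
  have hwlt : pvWrap N j < N := pvWrap_lt hj
  refine ⟨by simp [hv], fun p => by rw [hsetp p]; simp [hsts p], ?_⟩
  intro i hi
  by_cases hij : i = pvWrap N j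
  · subst hij
    rw [List.getD_eq_getElem _ _ (by simp [hv]; omega)]
    rw [List.getElem_set]
    rw [if_pos rfl]
    apply List.map_congr_left
    intro p hp
    rw [hsetp p, List.getD_eq_getElem _ _ (by simp [hsts p]; omega), List.getElem_set, if_pos rfl]
  · rw [List.getD_eq_getElem _ _ (by simp [hv]; omega), List.getElem_set, if_neg (by omega)]
    rw [← List.getD_eq_getElem _ _ (by omega : i < v.length), hagree i hi]
    apply List.map_congr_left
    intro p hp
    rw [hsetp p,
      List.getD_eq_getElem ((sts p).set (pvWrap N j) (val p)) (-1) (by simp [hsts p]; omega),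
      List.getElem_set, if_neg (by omega),
      ← List.getD_eq_getElem (sts p) (-1) (by rw [hsts p]; omega)]

lemma step_node (x_data fanin_list : List (List Int)) (g2i : PySem.Dict String Int) (P : Nat)
    (node : Int)
    (hn1 : PySem.Raise.InRange fanin_list.length node)
    (hn2 : ∀ pre ∈ PySem.List.pyGetD fanin_list node [], PySem.Raise.InRange x_data.length pre)
    (hn3 : PySem.List.pyGetD fanin_list node [] ≠ [] →
      PySem.Raise.InRange x_data.length node ∧ 2 ≤ (PySem.List.pyGetD x_data node []).length)
    (v : List (List Int)) (sts : Nat → List Int)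
    (hv : v.length = x_data.length) (hsts : ∀ p, (sts p).length = x_data.length)
    (hagree : ∀ i, i < x_data.length →
      v.getD i [] = (List.range P).map (fun p => (sts p).getD i (-1))) :
    (pvBstep x_data fanin_list g2i P v node).length = x_data.length ∧
    (∀ p, (pvAstep x_data fanin_list g2i (sts p) node).length = x_data.length) ∧
    (∀ i, i < x_data.length → (pvBstep x_data fanin_list g2i P v node).getD i []
       = (List.range P).map (fun p => (pvAstep x_data fanin_list g2i (sts p) node).getD i (-1))) := by
  set fis := PySem.List.pyGetD fanin_list node [] with hfis
  have hsrc : ∀ p, (fis.foldl (fun acc pre_idx => acc ++ [PySem.List.pyGetD (sts p) pre_idx (-1)]) [])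
      = fis.map (fun pre => PySem.List.pyGetD (sts p) pre (-1)) := by
    intro p
    rw [PySem.List.foldl_append_singleton_eq_map (fun pre => PySem.List.pyGetD (sts p) pre (-1)) fis []]
    rfl
  by_cases hemp : fis = []
  · -- no fanins: both sides leave the state unchanged
    have hb : pvBstep x_data fanin_list g2i P v node = v := by
      simp [pvBstep, ← hfis, hemp]
    have ha : ∀ p, pvAstep x_data fanin_list g2i (sts p) node = sts p := by
      intro p
      simp [pvAstep, ← hfis, hemp]
    rw [hb]
    exact ⟨hv, fun p => by rw [ha p]; exact hsts p, fun i hi => by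
      rw [hagree i hi]; exact List.map_congr_left (fun p _ => by rw [ha p])⟩
  · obtain ⟨hnx, hrow⟩ := hn3 hemp
    -- each fanin's pattern-vector in B is the per-pattern A signal list, transposed
    have hsig : ∀ pre ∈ fis, PySem.List.pyGetD v pre []
        = (List.range P).map (fun p => PySem.List.pyGetD (sts p) pre (-1)) := by
      intro pre hpre
      have hir := hn2 pre hpre
      have hirv : PySem.Raise.InRange v.length pre := by rw [hv]; exact hir
      rw [pyGetD_wrap v _ hirv, hv]
      rw [hagree (pvWrap x_data.length pre) (pvWrap_lt hir)]
      apply List.map_congr_left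
      intro p _
      have hirs : PySem.Raise.InRange (sts p).length pre := by rw [hsts p]; exact hir
      rw [pyGetD_wrap (sts p) _ hirs, hsts p]
    have hsigs_eq : fis.map (fun pre => PySem.List.pyGetD v pre [])
        = fis.map (fun pre => (List.range P).map (fun p => PySem.List.pyGetD (sts p) pre (-1))) :=
      List.map_congr_left hsig
    have hgv : pvGateVec (PySem.List.pyGetD (PySem.List.pyGetD x_data node []) 1 (-1))
          (fis.map (fun pre => PySem.List.pyGetD v pre [])) g2i P
        = (List.range P).map (fun p =>
            (pvLogic (PySem.List.pyGetD (PySem.List.pyGetD x_data node []) 1 (-1))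
              (fis.map (fun pre => PySem.List.pyGetD (sts p) pre (-1))) g2i).getD (-1)) := by
      rw [hsigs_eq]
      rw [gateVec_eq _ g2i P _
        (by intro s hs; obtain ⟨pre, _, rfl⟩ := List.mem_map.mp hs; simp)
        (by simpa using hemp)]
      apply List.map_congr_left
      intro p hp
      rw [List.mem_range] at hp
      rw [List.map_map]
      have hLL : fis.map ((fun s => s.getD p (-1)) ∘ fun pre =>
            (List.range P).map (fun q => PySem.List.pyGetD (sts q) pre (-1)))
          = fis.map (fun pre => PySem.List.pyGetD (sts p) pre (-1)) := by
        apply List.map_congr_left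
        intro pre _
        simp only [Function.comp_def]
        rw [PySem.List.getD_map_range _ _ _ _ hp]
      rw [hLL]
    -- B takes its branch
    have hbne : fis.map (fun pre => PySem.List.pyGetD v pre []) ≠ [] := by simpa using hemp
    have hb : pvBstep x_data fanin_list g2i P v node
        = PySem.List.pySetD v node ((List.range P).map (fun p =>
            (pvLogic (PySem.List.pyGetD (PySem.List.pyGetD x_data node []) 1 (-1))
              (fis.map (fun pre => PySem.List.pyGetD (sts p) pre (-1))) g2i).getD (-1))) := by
      rw [pvBstep, ← hfis]
      simp only [if_pos hbne]
      rw [hgv]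
    have ha : ∀ p, pvAstep x_data fanin_list g2i (sts p) node
        = PySem.List.pySetD (sts p) node
            ((pvLogic (PySem.List.pyGetD (PySem.List.pyGetD x_data node []) 1 (-1))
              (fis.map (fun pre => PySem.List.pyGetD (sts p) pre (-1))) g2i).getD (-1)) := by
      intro p
      rw [pvAstep, ← hfis]
      rw [hsrc p]
      simp only [List.length_map]
      rw [if_pos (List.length_pos_of_ne_nil hemp)]
    rw [hb]
    have hconc := set_inv x_data.length P node hnx v sts
      (fun p => (pvLogic (PySem.List.pyGetD (PySem.List.pyGetD x_data node []) 1 (-1))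
        (fis.map (fun pre => PySem.List.pyGetD (sts p) pre (-1))) g2i).getD (-1))
      hv hsts hagree
    exact ⟨hconc.1, fun p => by rw [ha p]; exact hconc.2.1 p, fun i hi => by
      rw [hconc.2.2 i hi]
      exact List.map_congr_left (fun p _ => by rw [ha p])⟩

lemma step_nodes (x_data fanin_list : List (List Int)) (g2i : PySem.Dict String Int) (P : Nat) :
    ∀ (nodes : List Int),
    (∀ node ∈ nodes,
      PySem.Raise.InRange fanin_list.length node ∧
      (∀ pre ∈ PySem.List.pyGetD fanin_list node [], PySem.Raise.InRange x_data.length pre) ∧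
      (PySem.List.pyGetD fanin_list node [] ≠ [] →
        PySem.Raise.InRange x_data.length node ∧ 2 ≤ (PySem.List.pyGetD x_data node []).length)) →
    ∀ (v : List (List Int)) (sts : Nat → List Int),
    v.length = x_data.length → (∀ p, (sts p).length = x_data.length) →
    (∀ i, i < x_data.length → v.getD i [] = (List.range P).map (fun p => (sts p).getD i (-1))) →
    (nodes.foldl (pvBstep x_data fanin_list g2i P) v).length = x_data.length ∧
    (∀ p, (nodes.foldl (pvAstep x_data fanin_list g2i) (sts p)).length = x_data.length) ∧
    (∀ i, i < x_data.length → (nodes.foldl (pvBstep x_data fanin_list g2i P) v).getD i []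
       = (List.range P).map (fun p => (nodes.foldl (pvAstep x_data fanin_list g2i) (sts p)).getD i (-1))) := by
  intro nodes
  induction nodes with
  | nil => intro _ v sts hv hsts hagree; exact ⟨hv, hsts, hagree⟩
  | cons node t ih =>
    intro hconds v sts hv hsts hagree
    obtain ⟨h1, h2, h3⟩ := hconds node (by simp)
    obtain ⟨hv', hsts', hagree'⟩ := step_node x_data fanin_list g2i P node h1 h2 h3 v sts hv hsts hagree
    simpa using ih (fun n hn => hconds n (by simp [hn])) _ _ hv' hsts' hagree'

lemma step_levels (x_data fanin_list : List (List Int)) (g2i : PySem.Dict String Int) (P : Nat) :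
    ∀ (levels : List (List Int)),
    (∀ lvl ∈ levels, ∀ node ∈ lvl,
      PySem.Raise.InRange fanin_list.length node ∧
      (∀ pre ∈ PySem.List.pyGetD fanin_list node [], PySem.Raise.InRange x_data.length pre) ∧
      (PySem.List.pyGetD fanin_list node [] ≠ [] →
        PySem.Raise.InRange x_data.length node ∧ 2 ≤ (PySem.List.pyGetD x_data node []).length)) →
    ∀ (v : List (List Int)) (sts : Nat → List Int),
    v.length = x_data.length → (∀ p, (sts p).length = x_data.length) →
    (∀ i, i < x_data.length → v.getD i [] = (List.range P).map (fun p => (sts p).getD i (-1))) →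
    (levels.foldl (fun v lvl => lvl.foldl (pvBstep x_data fanin_list g2i P) v) v).length = x_data.length ∧
    (∀ p, (levels.foldl (fun st lvl => lvl.foldl (pvAstep x_data fanin_list g2i) st) (sts p)).length = x_data.length) ∧
    (∀ i, i < x_data.length →
      (levels.foldl (fun v lvl => lvl.foldl (pvBstep x_data fanin_list g2i P) v) v).getD i []
       = (List.range P).map (fun p =>
          (levels.foldl (fun st lvl => lvl.foldl (pvAstep x_data fanin_list g2i) st) (sts p)).getD i (-1))) := by
  intro levels
  induction levels with
  | nil => intro _ v sts hv hsts hagree; exact ⟨hv, hsts, hagree⟩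
  | cons lvl t ih =>
    intro hconds v sts hv hsts hagree
    obtain ⟨hv', hsts', hagree'⟩ := step_nodes x_data fanin_list g2i P lvl
      (hconds lvl (by simp)) v sts hv hsts hagree
    simpa using ih (fun l hl => hconds l (by simp [hl])) _ _ hv' hsts' hagree'

-- ## the PI initialization, in parallel over all patterns
lemma parSet (N P : Nat) (F G : (Int × Int) → Nat → Int) :
    ∀ (l : List (Int × Int)) (v : List (List Int)) (sts : Nat → List Int),
    v.length = N → (∀ p, (sts p).length = N) →
    (∀ i, i < N → v.getD i [] = (List.range P).map (fun p => (sts p).getD i (-1))) →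
    (∀ kp ∈ l, PySem.Raise.InRange N kp.2) →
    (∀ kp ∈ l, ∀ p, p < P → F kp p = G kp p) →
    ((l.foldl (fun v kp => PySem.List.pySetD v kp.2 ((List.range P).map (F kp))) v).length = N) ∧
    (∀ p, (l.foldl (fun st kp => PySem.List.pySetD st kp.2 (G kp p)) (sts p)).length = N) ∧
    (∀ i, i < N →
      (l.foldl (fun v kp => PySem.List.pySetD v kp.2 ((List.range P).map (F kp))) v).getD i []
       = (List.range P).map (fun p =>
          (l.foldl (fun st kp => PySem.List.pySetD st kp.2 (G kp p)) (sts p)).getD i (-1))) := by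
  intro l
  induction l with
  | nil => intro v sts hv hsts hagree _ _; exact ⟨hv, hsts, hagree⟩
  | cons kp t ih =>
    intro v sts hv hsts hagree hin hfg
    have hmapFG : (List.range P).map (F kp) = (List.range P).map (G kp) :=
      List.map_congr_left (fun p hp => hfg kp (by simp) p (List.mem_range.mp hp))
    obtain ⟨hv', hsts', hagree'⟩ := set_inv N P kp.2 (hin kp (by simp)) v sts (G kp) hv hsts hagree
    simp only [List.foldl_cons, hmapFG]
    exact ih _ _ hv' hsts' hagree' (fun n hn => hin n (by simp [hn]))
      (fun n hn => hfg n (by simp [hn]))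

def pvStA1 (x_data : List (List Int)) (PI_indexes : List Int) (p : Nat) : List Int :=
  (PySem.List.enumerate PI_indexes 0).foldl
    (fun st kp => PySem.List.pySetD st kp.2
      (PySem.List.pyGetD (pvDec2list (p : Int) (PI_indexes.length : Int)) kp.1 0))
    (List.replicate x_data.length (-1 : Int))

def pvVecInit (x_data : List (List Int)) (PI_indexes : List Int) : List (List Int) :=
  (PySem.List.enumerate PI_indexes 0).foldl (fun v kp =>
      PySem.List.pySetD v kp.2
        ((List.range (2 ^ PI_indexes.length)).map (fun p =>
          (((p >>> (PI_indexes.length - 1 - kp.1.toNat)) &&& 1 : Nat) : Int))))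
    (x_data.map (fun _ => List.replicate (2 ^ PI_indexes.length) (-1 : Int)))

lemma init_inv (x_data : List (List Int)) (PI_indexes : List Int)
    (hPI : ∀ pi ∈ PI_indexes, PySem.Raise.InRange x_data.length pi) :
    (pvVecInit x_data PI_indexes).length = x_data.length ∧
    (∀ p, (pvStA1 x_data PI_indexes p).length = x_data.length) ∧
    (∀ i, i < x_data.length → (pvVecInit x_data PI_indexes).getD i []
       = (List.range (2 ^ PI_indexes.length)).map
           (fun p => (pvStA1 x_data PI_indexes p).getD i (-1))) := by
  have hbase3 : ∀ i, i < x_data.length →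
      (x_data.map (fun _ => List.replicate (2 ^ PI_indexes.length) (-1 : Int))).getD i []
      = (List.range (2 ^ PI_indexes.length)).map
          (fun _ => (List.replicate x_data.length (-1 : Int)).getD i (-1)) := by
    intro i hi
    rw [List.getD_eq_getElem _ _ (by simpa using hi), List.getElem_map]
    apply List.ext_getElem (by simp)
    intro q h1 h2
    rw [List.getElem_replicate, List.getElem_map]
    rw [List.getD_eq_getElem _ _ (by simpa using hi), List.getElem_replicate]
  exact parSet x_data.length (2 ^ PI_indexes.length)
    (fun kp p => (((p >>> (PI_indexes.length - 1 - kp.1.toNat)) &&& 1 : Nat) : Int))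
    (fun kp p => PySem.List.pyGetD (pvDec2list (p : Int) (PI_indexes.length : Int)) kp.1 0)
    (PySem.List.enumerate PI_indexes 0)
    (x_data.map (fun _ => List.replicate (2 ^ PI_indexes.length) (-1 : Int)))
    (fun _ => List.replicate x_data.length (-1 : Int))
    (by simp) (fun _ => by simp) hbase3
    (by
      intro kp hkp
      obtain ⟨k, hk, rfl⟩ := (PySem.List.mem_enumerate_iff _ _ _).mp hkp
      exact hPI _ (List.getElem_mem hk))
    (by
      intro kp hkp p hp
      obtain ⟨k, hk, rfl⟩ := (PySem.List.mem_enumerate_iff _ _ _).mp hkp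
      have hn1 : 1 ≤ PI_indexes.length := by omega
      show (((p >>> (PI_indexes.length - 1 - ((0 : Int) + (k : Int)).toNat)) &&& 1 : Nat) : Int)
        = PySem.List.pyGetD (pvDec2list (p : Int) (PI_indexes.length : Int)) ((0 : Int) + (k : Int)) 0
      have hk1 : ((0 : Int) + (k : Int)).toNat = k := by omega
      have hcast : ((0 : Int) + (k : Int)) = ((k : Nat) : Int) := by omega
      rw [hk1, hcast, PySem.List.pyGetD_natCast, dec2list_eq p PI_indexes.length hn1 hp]
      rw [List.getD_eq_getElem _ _ (by simpa using hk), List.getElem_map, List.getElem_range])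

-- ## assembling the truth table from per-pattern states
lemma ttstep_aux (st : List Int) :
    ∀ (k : Nat) (tt : List (List Int)), k ≤ tt.length →
    (List.range k).foldl (fun t idx => t.set idx (t.getD idx [] ++ [st.getD idx (-1)])) tt
    = (List.range tt.length).map
        (fun i => if i < k then tt.getD i [] ++ [st.getD i (-1)] else tt.getD i []) := by
  intro k
  induction k with
  | zero =>
    intro tt _
    apply List.ext_getElem (by simp)
    intro i h1 h2
    simp only [List.range_zero, List.foldl_nil] at *
    rw [List.getElem_map, List.getElem_range, if_neg (by omega)]
    exact (List.getD_eq_getElem tt [] (by simpa using h1)).symm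
  | succ k ih =>
    intro tt hk
    rw [List.range_succ, List.foldl_append, List.foldl_cons, List.foldl_nil]
    rw [ih tt (by omega)]
    have hklt : k < tt.length := by omega
    have hgetk : ((List.range tt.length).map
        (fun i => if i < k then tt.getD i [] ++ [st.getD i (-1)] else tt.getD i [])).getD k []
        = tt.getD k [] := by
      rw [PySem.List.getD_map_range _ _ _ _ hklt, if_neg (by omega)]
    rw [hgetk]
    apply List.ext_getElem (by simp)
    intro i h1 h2
    simp only [List.length_set, List.length_map, List.length_range] at h1 h2
    rw [List.getElem_set, List.getElem_map, List.getElem_range]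
    rw [List.getElem_map, List.getElem_range]
    by_cases hik : k = i
    · subst hik
      rw [if_pos rfl, if_pos (by omega)]
    · rw [if_neg hik]
      by_cases hlt : i < k
      · rw [if_pos hlt, if_pos (by omega)]
      · rw [if_neg hlt, if_neg (by omega)]

lemma ttstep (st : List Int) (tt : List (List Int)) :
    (List.range tt.length).foldl (fun t (idx : Nat) =>
      PySem.List.pySetD t (idx : Int) (PySem.List.pyGetD t (idx : Int) []
        ++ [PySem.List.pyGetD st (idx : Int) (-1)])) tt
    = (List.range tt.length).map (fun i => tt.getD i [] ++ [st.getD i (-1)]) := by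
  rw [PySem.List.foldl_congr_mem (List.range tt.length) _
    (fun t idx => t.set idx (t.getD idx [] ++ [st.getD idx (-1)])) tt
    (by intro acc idx _; simp)]
  rw [ttstep_aux st tt.length tt (by omega)]
  apply List.map_congr_left
  intro i hi
  rw [if_pos (List.mem_range.mp hi)]

lemma ttstep' (st : List Int) (N : Nat) (tt : List (List Int)) (htt : tt.length = N) :
    (List.range N).foldl (fun t (idx : Nat) =>
      PySem.List.pySetD t (idx : Int) (PySem.List.pyGetD t (idx : Int) []
        ++ [PySem.List.pyGetD st (idx : Int) (-1)])) tt
    = (List.range N).map (fun i => tt.getD i [] ++ [st.getD i (-1)]) := by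
  subst htt
  exact ttstep st tt

lemma outer_fold (N : Nat) (stF : Nat → List Int) :
    ∀ m : Nat,
    (List.range m).foldl (fun tt (p : Nat) =>
        (List.range N).foldl (fun tt (idx : Nat) =>
          PySem.List.pySetD tt (idx : Int) (PySem.List.pyGetD tt (idx : Int) []
            ++ [PySem.List.pyGetD (stF p) (idx : Int) (-1)])) tt)
      (List.replicate N ([] : List Int))
    = (List.range N).map (fun i => (List.range m).map (fun p => (stF p).getD i (-1))) := by
  intro m
  induction m with
  | zero => simp [List.map_const', eq_comm]
  | succ m ih =>
    rw [List.range_succ, List.foldl_append, List.foldl_cons, List.foldl_nil, ih]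
    rw [ttstep' (stF m) N _ (by simp)]
    apply List.map_congr_left
    intro i hi
    rw [List.mem_range] at hi
    rw [PySem.List.getD_map_range _ _ _ _ hi]
    rw [List.map_append, List.map_singleton]

-- ## the two ports, re-expressed through the step functions
def pvStateA (x_data : List (List Int)) (PI_indexes : List Int)
    (level_list fanin_list : List (List Int)) (g2i : PySem.Dict String Int)
    (pattern_idx : Nat) : List Int :=
  (PySem.List.pyRange 1 (PySem.List.len level_list) 1).foldl (fun st level =>
    (PySem.List.pyGetD level_list level []).foldl
      (fun st node_idx => pvAstep x_data fanin_list g2i st node_idx) st)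
    (pvStA1 x_data PI_indexes pattern_idx)

lemma portA_char (x_data : List (List Int)) (PI_indexes : List Int)
    (level_list fanin_list : List (List Int)) (gate_to_index : List (String × Int)) :
    simulator_truth_table x_data PI_indexes level_list fanin_list gate_to_index
    = (List.range (2 ^ PI_indexes.length)).foldl (fun tt (pattern_idx : Nat) =>
        (List.range x_data.length).foldl (fun tt (idx : Nat) =>
          PySem.List.pySetD tt (idx : Int) (PySem.List.pyGetD tt (idx : Int) []
            ++ [PySem.List.pyGetD
                  (pvStateA x_data PI_indexes level_list fanin_list
                    (PySem.Dict.ofList gate_to_index) pattern_idx) (idx : Int) (-1)])) tt)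
        ((List.range x_data.length).foldl (fun tt _ => tt ++ [([] : List Int)]) []) := by
  unfold simulator_truth_table pvStateA pvStA1 pvAstep
  rfl

lemma stateA_char (x_data : List (List Int)) (PI_indexes : List Int)
    (level_list fanin_list : List (List Int)) (g2i : PySem.Dict String Int) (p : Nat) :
    pvStateA x_data PI_indexes level_list fanin_list g2i p
    = (level_list.drop 1).foldl
        (fun st lvl => lvl.foldl (pvAstep x_data fanin_list g2i) st)
        (pvStA1 x_data PI_indexes p) :=
  PySem.List.foldl_pyRange_pyGetD level_list []
    (fun st lvl => lvl.foldl (pvAstep x_data fanin_list g2i) st)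
    (pvStA1 x_data PI_indexes p) (by norm_num)

lemma portB_char (x_data : List (List Int)) (PI_indexes : List Int)
    (level_list fanin_list : List (List Int)) (gate_to_index : List (String × Int)) :
    simulator_truth_table_alt x_data PI_indexes level_list fanin_list gate_to_index
    = (level_list.drop 1).foldl
        (fun v lvl => lvl.foldl
          (pvBstep x_data fanin_list (PySem.Dict.ofList gate_to_index) (2 ^ PI_indexes.length)) v)
        (pvVecInit x_data PI_indexes) := by
  have hs : PySem.List.slice level_list (some 1) none = level_list.drop 1 := by
    rw [PySem.List.slice_from level_list (by norm_num : (0 : Int) ≤ 1)]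
    rfl
  show (PySem.List.slice level_list (some 1) none).foldl
      (fun v lvl => lvl.foldl
        (pvBstep x_data fanin_list (PySem.Dict.ofList gate_to_index) (2 ^ PI_indexes.length)) v)
      (pvVecInit x_data PI_indexes) = _
  rw [hs]

-- ===== VERDICT (by name: the statement is the Claim_ definition above) =====
theorem simulator_truth_table_spec : Claim_equal_simulator_truth_table := by
  unfold Claim_equal_simulator_truth_table
  intro x_data PI_indexes level_list fanin_list gate_to_index _hdom hpre
  unfold Spec_simulator_truth_table
  obtain ⟨hPI, hlvl⟩ := hpre
  obtain ⟨hi1, hi2, hi3⟩ := init_inv x_data PI_indexes hPI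
  obtain ⟨hf1, hf2, hf3⟩ := step_levels x_data fanin_list (PySem.Dict.ofList gate_to_index)
    (2 ^ PI_indexes.length) (level_list.drop 1) hlvl (pvVecInit x_data PI_indexes)
    (pvStA1 x_data PI_indexes) hi1 hi2 hi3
  rw [portA_char, portB_char]
  have htt0 : (List.range x_data.length).foldl (fun tt _ => tt ++ [([] : List Int)]) []
      = List.replicate x_data.length ([] : List Int) := by
    rw [PySem.List.foldl_append_singleton_eq_map (fun _ => ([] : List Int))
      (List.range x_data.length) []]
    simp [List.map_const']
  rw [htt0]
  refine (outer_fold x_data.length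
    (fun p => pvStateA x_data PI_indexes level_list fanin_list
      (PySem.Dict.ofList gate_to_index) p)
    (2 ^ PI_indexes.length)).trans ?_
  apply List.ext_getElem
  · simp only [List.length_map, List.length_range]
    exact hf1.symm
  · intro i h1 h2
    rw [List.getElem_map, List.getElem_range]
    have hiN : i < x_data.length := by simpa using h1
    rw [← List.getD_eq_getElem _ [] h2]
    rw [hf3 i hiN]
    apply List.map_congr_left
    intro p _
    rw [stateA_char]
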